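-- pv_equiv track=rewrite | github.com/richard-timpson/solar-panel-output-prediction | code/DataCleaning/train_test_split.py | join_irradiance_data
-- ===== SOURCE A (Python) =====
-- def join_irradiance_data(production_rows, irradiance_rows):
--
--     joined_rows = []
--
--     p_start = 0
--     for r in irradiance_rows:
--         r_date = r[0]
--         for i in range(p_start, len(production_rows)):
--             p = production_rows[i]
--             if r_date == p[0]:
--                 p_start = i  # Use the fact that these are in sorted order
--                 joined_rows.append(p + r[1:])
--                 break
--
--     return joined_rows
-- ===== SOURCE B (Python) =====
-- def join_irradiance_data(production_rows, irradiance_rows):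
--     # Index production rows: date -> ascending list of row indices.
--     index = {}
--     for i, p in enumerate(production_rows):
--         index.setdefault(p[0], []).append(i)
--
--     joined_rows = []
--     p_start = 0
--     for r in irradiance_rows:
--         idxs = index.get(r[0], [])
--         # binary search: first position in idxs with idxs[pos] >= p_start
--         lo, hi = 0, len(idxs)
--         while lo < hi:
--             mid = (lo + hi) // 2
--             if idxs[mid] < p_start:
--                 lo = mid + 1
--             else:
--                 hi = mid
--         if lo < len(idxs):
--             p_start = idxs[lo]
--             joined_rows.append(production_rows[p_start] + r[1:])
--     return joined_rows
-- ===== Notes on version B (the rewrite author's own statement) =====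
-- stated objective: alternative
-- what changed: Replaces A's per-row linear rescan of production_rows with a prebuilt date->sorted-index-list dictionary plus a hand-written binary search for the first index >= p_start; intended as faster (O(n + m log n) vs O(n*m) worst case) but a timing run read only 1.66x at the largest size and inconsistently across sizes, so no speed claim.
-- outside the precondition, e.g. on join_irradiance_data([[]], []): A returns [], B raises IndexError; on join_irradiance_data([['d'], []], [['d', 'x']]): A returns [['d', 'x']], B raises IndexError
import Mathlib
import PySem

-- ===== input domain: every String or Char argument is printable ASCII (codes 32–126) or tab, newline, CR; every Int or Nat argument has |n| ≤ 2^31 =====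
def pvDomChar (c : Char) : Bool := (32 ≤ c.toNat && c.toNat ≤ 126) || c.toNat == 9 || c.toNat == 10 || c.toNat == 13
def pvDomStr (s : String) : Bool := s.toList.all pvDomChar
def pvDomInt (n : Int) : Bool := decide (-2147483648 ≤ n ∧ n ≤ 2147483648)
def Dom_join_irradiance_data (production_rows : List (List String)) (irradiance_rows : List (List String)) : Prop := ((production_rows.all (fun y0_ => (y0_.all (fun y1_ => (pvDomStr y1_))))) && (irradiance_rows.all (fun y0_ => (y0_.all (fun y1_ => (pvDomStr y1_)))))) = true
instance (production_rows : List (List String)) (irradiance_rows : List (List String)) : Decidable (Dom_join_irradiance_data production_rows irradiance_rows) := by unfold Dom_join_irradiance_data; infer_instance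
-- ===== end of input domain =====

-- B replaces A's per-row linear rescan of production_rows by a prebuilt date→index-list
-- dictionary plus a hand-written binary search for the first index ≥ p_start.

-- ===== PORT A =====
-- the inner 'for i in range(p_start, len(production_rows)): … break' loop of A
-- (p[0] ported as pyGetD; exact because Pre_ excludes empty rows, where Python raises IndexError)
def innerAGo (production_rows : List (List String)) (r_date : String) : Nat → Int → Option Int
  | 0, _ => none
  | fuel + 1, i =>
    if i < (production_rows.length : Int) then
      if r_date = PySem.List.pyGetD (PySem.List.pyGetD production_rows i []) 0 "" then some i
      else innerAGo production_rows r_date fuel (i + 1)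
    else none

def innerA (production_rows : List (List String)) (r_date : String) (i : Int) : Option Int :=
  innerAGo production_rows r_date (((production_rows.length : Int) - i).toNat) i

-- the body of A's outer 'for r in irradiance_rows' loop, state = (p_start, joined_rows)
def stepA (production_rows : List (List String)) (st : Int × List (List String)) (r : List String) : Int × List (List String) :=
  let r_date := PySem.List.pyGetD r 0 ""
  match innerA production_rows r_date st.1 with
  | some i => (i, st.2 ++ [PySem.List.pyGetD production_rows i [] ++ PySem.List.slice r (some 1) none])
  | none => st

def join_irradiance_data (production_rows : List (List String)) (irradiance_rows : List (List String)) : List (List String) :=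
  (irradiance_rows.foldl (stepA production_rows) ((0 : Int), ([] : List (List String)))).2

-- ===== PORT B =====
-- hand-written bisect_left loop of Source B: first position in [lo,hi) with idxs[pos] ≥ t
def bisectGo (idxs : List Int) (t : Int) : Nat → Nat → Nat → Nat
  | 0, lo, _ => lo
  | fuel + 1, lo, hi =>
    if lo < hi then
      if idxs.getD ((lo + hi) / 2) 0 < t then bisectGo idxs t fuel ((lo + hi) / 2 + 1) hi
      else bisectGo idxs t fuel lo ((lo + hi) / 2)
    else lo

def bisectLoop (idxs : List Int) (t : Int) (lo hi : Nat) : Nat :=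
  bisectGo idxs t (hi - lo) lo hi

-- 'index.setdefault(p[0], []).append(i)' over enumerate(production_rows)
def buildIndex (production_rows : List (List String)) : PySem.Dict String (List Int) :=
  (PySem.List.enumerate production_rows 0).foldl
    (fun d e => d.modify (PySem.List.pyGetD e.2 0 "") [] (· ++ [e.1])) PySem.Dict.empty

-- the body of Source B's 'for r in irradiance_rows' loop, state = (p_start, joined_rows)
def stepB (production_rows : List (List String)) (index : PySem.Dict String (List Int)) (st : Int × List (List String)) (r : List String) : Int × List (List String) :=
  let idxs := index.getD (PySem.List.pyGetD r 0 "") []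
  let lo := bisectLoop idxs st.1 0 idxs.length
  if lo < idxs.length then
    (idxs.getD lo 0, st.2 ++ [PySem.List.pyGetD production_rows (idxs.getD lo 0) [] ++ PySem.List.slice r (some 1) none])
  else st

def join_irradiance_data_alt (production_rows : List (List String)) (irradiance_rows : List (List String)) : List (List String) :=
  (irradiance_rows.foldl (stepB production_rows (buildIndex production_rows)) ((0 : Int), ([] : List (List String)))).2

-- ===== PRECONDITION & SPEC =====
-- Pre_ requires every row nonempty: an empty irradiance row always makes A raise IndexError at r[0];
-- an empty production row makes A raise whenever its inner scan reaches it (and B indexes every p[0]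
-- up front), so Pre_ also excludes a few inputs where A happens to return, e.g. an empty production
-- row that A never scans.
def Pre_join_irradiance_data (production_rows : List (List String)) (irradiance_rows : List (List String)) : Prop :=
  (∀ p ∈ production_rows, p ≠ []) ∧ (∀ r ∈ irradiance_rows, r ≠ [])
instance (production_rows : List (List String)) (irradiance_rows : List (List String)) : Decidable (Pre_join_irradiance_data production_rows irradiance_rows) := by unfold Pre_join_irradiance_data; infer_instance

def pvWitness_join_irradiance_data : List (List String) × List (List String) :=
  ([["a"], ["b"]], [["b", "7"]])

def Spec_join_irradiance_data (production_rows : List (List String)) (irradiance_rows : List (List String)) (out : List (List String)) : Prop := out = join_irradiance_data_alt production_rows irradiance_rows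
instance (production_rows : List (List String)) (irradiance_rows : List (List String)) (out : List (List String)) : Decidable (Spec_join_irradiance_data production_rows irradiance_rows out) := by unfold Spec_join_irradiance_data; infer_instance

-- ===== CLAIM (what is proved, stated in full; the proofs are below) =====
def Claim_equal_join_irradiance_data : Prop := ∀ (production_rows : List (List String)) (irradiance_rows : List (List String)), Dom_join_irradiance_data production_rows irradiance_rows → Pre_join_irradiance_data production_rows irradiance_rows → Spec_join_irradiance_data production_rows irradiance_rows (join_irradiance_data production_rows irradiance_rows)

-- ===== LEMMAS AND PROOFS =====

-- the per-date index list B's dictionary stores, in characterised form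
def group (production_rows : List (List String)) (date : String) : List Int :=
  ((PySem.List.enumerate production_rows 0).filter
    (fun e => PySem.List.pyGetD e.2 0 "" == date)).map (·.1)

lemma index_getD (production_rows : List (List String)) (date : String) :
    (buildIndex production_rows).getD date [] = group production_rows date := by
  have h1 : buildIndex production_rows =
      ((PySem.List.enumerate production_rows 0).map
        (fun e => (PySem.List.pyGetD e.2 0 "", e.1))).foldl
        (fun d p => d.modify p.1 ([] : List Int) (· ++ [p.2])) PySem.Dict.empty := by
    unfold buildIndex; rw [List.foldl_map]
  rw [h1, PySem.Dict.getD_foldl_modify_append]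
  simp [group, List.filter_map, List.map_map, Function.comp_def]

lemma mem_group (production_rows : List (List String)) (date : String) (x : Int) :
    x ∈ group production_rows date ↔
      0 ≤ x ∧ x < (production_rows.length : Int) ∧
        date = PySem.List.pyGetD (PySem.List.pyGetD production_rows x []) 0 "" := by
  constructor
  · intro hx
    simp only [group, List.mem_map, List.mem_filter, PySem.List.mem_enumerate_iff] at hx
    obtain ⟨e, ⟨⟨k, hk, rfl⟩, hpred⟩, rfl⟩ := hx
    simp only [beq_iff_eq] at hpred
    refine ⟨by simp, by simpa using hk, ?_⟩
    have hidx : PySem.List.pyGetD production_rows ((0 : Int) + (k : Int)) [] = production_rows[k] := by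
      rw [zero_add, PySem.List.pyGetD_natCast, List.getD_eq_getElem _ _ hk]
    simp only [hidx]
    exact hpred.symm
  · rintro ⟨h0, hlt, hdate⟩
    have hk : x.toNat < production_rows.length := by omega
    simp only [group, List.mem_map, List.mem_filter, PySem.List.mem_enumerate_iff]
    refine ⟨((0 : Int) + (x.toNat : Int), production_rows[x.toNat]), ⟨⟨x.toNat, hk, rfl⟩, ?_⟩, by simp; omega⟩
    simp only [beq_iff_eq]
    have hidx : PySem.List.pyGetD production_rows x [] = production_rows[x.toNat] := by
      have hx' : x = ((x.toNat : Nat) : Int) := by omega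
      conv_lhs => rw [hx']
      rw [PySem.List.pyGetD_natCast, List.getD_eq_getElem _ _ hk]
    rw [hidx] at hdate
    exact hdate.symm

lemma group_sorted (production_rows : List (List String)) (date : String) :
    (group production_rows date).Pairwise (· < ·) := by
  unfold group
  rw [List.pairwise_map]
  exact (PySem.List.pairwise_lt_enumerate production_rows 0).filter _

lemma bisectGo_inv (g : List Int) (t : Int)
    (hmono : ∀ a b : Nat, a ≤ b → b < g.length → g.getD a 0 ≤ g.getD b 0) :
    ∀ (n lo hi : Nat), hi - lo ≤ n → lo ≤ hi → hi ≤ g.length →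
      (∀ j, j < lo → g.getD j 0 < t) →
      (∀ j, hi ≤ j → j < g.length → t ≤ g.getD j 0) →
      bisectGo g t n lo hi ≤ g.length ∧
        (∀ j, j < bisectGo g t n lo hi → g.getD j 0 < t) ∧
        (∀ j, bisectGo g t n lo hi ≤ j → j < g.length → t ≤ g.getD j 0) := by
  intro n
  induction n with
  | zero =>
    intro lo hi hn hle hhi hlo hhi'
    simp only [bisectGo]
    exact ⟨by omega, hlo, fun j hj hjl => hhi' j (by omega) hjl⟩
  | succ n ih =>
    intro lo hi hn hle hhi hlo hhi'
    rw [bisectGo]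
    by_cases h : lo < hi
    · rw [if_pos h]
      by_cases hm : g.getD ((lo + hi) / 2) 0 < t
      · rw [if_pos hm]
        refine ih ((lo + hi) / 2 + 1) hi (by omega) (by omega) hhi ?_ hhi'
        intro j hj
        exact lt_of_le_of_lt (hmono j ((lo + hi) / 2) (by omega) (by omega)) hm
      · rw [if_neg hm]
        refine ih lo ((lo + hi) / 2) (by omega) (by omega) (by omega) hlo ?_
        intro j hj hjl
        exact le_trans (not_lt.mp hm) (hmono ((lo + hi) / 2) j hj hjl)
    · rw [if_neg h]
      exact ⟨by omega, hlo, fun j hj hjl => hhi' j (by omega) hjl⟩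

lemma bisect_inv (g : List Int) (t : Int)
    (hmono : ∀ a b : Nat, a ≤ b → b < g.length → g.getD a 0 ≤ g.getD b 0)
    (lo hi : Nat) (hle : lo ≤ hi) (hhi : hi ≤ g.length)
    (hlo : ∀ j, j < lo → g.getD j 0 < t)
    (hhi' : ∀ j, hi ≤ j → j < g.length → t ≤ g.getD j 0) :
    bisectLoop g t lo hi ≤ g.length ∧
      (∀ j, j < bisectLoop g t lo hi → g.getD j 0 < t) ∧
      (∀ j, bisectLoop g t lo hi ≤ j → j < g.length → t ≤ g.getD j 0) :=
  bisectGo_inv g t hmono (hi - lo) lo hi le_rfl hle hhi hlo hhi'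

lemma innerA_spec_none (production_rows : List (List String)) (date : String) (s : Int)
    (h : ∀ j : Int, s ≤ j → j < (production_rows.length : Int) →
      ¬ date = PySem.List.pyGetD (PySem.List.pyGetD production_rows j []) 0 "") :
    innerA production_rows date s = none := by
  have H : ∀ (fuel : Nat) (s : Int), ((production_rows.length : Int) - s).toNat ≤ fuel →
      (∀ j : Int, s ≤ j → j < (production_rows.length : Int) →
        ¬ date = PySem.List.pyGetD (PySem.List.pyGetD production_rows j []) 0 "") →
      innerAGo production_rows date fuel s = none := by
    intro fuel
    induction fuel with
    | zero =>
      intro s hf h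
      rfl
    | succ n ih =>
      intro s hf h
      rw [innerAGo]
      by_cases hs : s < (production_rows.length : Int)
      · rw [if_pos hs, if_neg (h s le_rfl hs)]
        exact ih (s + 1) (by omega) (fun j hj hjl => h j (by omega) hjl)
      · rw [if_neg hs]
  rw [innerA]
  exact H _ s le_rfl h

lemma innerA_spec_some (production_rows : List (List String)) (date : String) (s i : Int)
    (h1 : s ≤ i) (h2 : i < (production_rows.length : Int))
    (h3 : date = PySem.List.pyGetD (PySem.List.pyGetD production_rows i []) 0 "")
    (h4 : ∀ j : Int, s ≤ j → j < i →
      ¬ date = PySem.List.pyGetD (PySem.List.pyGetD production_rows j []) 0 "") :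
    innerA production_rows date s = some i := by
  have H : ∀ (fuel : Nat) (s : Int), ((production_rows.length : Int) - s).toNat ≤ fuel → s ≤ i →
      (∀ j : Int, s ≤ j → j < i →
        ¬ date = PySem.List.pyGetD (PySem.List.pyGetD production_rows j []) 0 "") →
      innerAGo production_rows date fuel s = some i := by
    intro fuel
    induction fuel with
    | zero =>
      intro s hf hsi h4'
      exact absurd hf (by omega)
    | succ n ih =>
      intro s hf hsi h4'
      by_cases heq : s = i
      · subst heq
        rw [innerAGo, if_pos h2, if_pos h3]
      · have hlt : s < i := lt_of_le_of_ne hsi heq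
        rw [innerAGo, if_pos (by omega), if_neg (h4' s le_rfl hlt)]
        exact ih (s + 1) (by omega) (by omega) (fun j hj hji => h4' j (by omega) hji)
  rw [innerA]
  exact H _ s le_rfl h1 h4

-- B's per-row step (dictionary lookup + binary search) computes exactly A's inner scan
lemma stepB_eq_innerA (production_rows : List (List String)) (date : String) (s : Int) (hs : 0 ≤ s) :
    (if bisectLoop (group production_rows date) s 0 (group production_rows date).length
          < (group production_rows date).length
     then some ((group production_rows date).getD
            (bisectLoop (group production_rows date) s 0 (group production_rows date).length) 0)
     else none) = innerA production_rows date s := by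
  set g := group production_rows date with hg
  have hsorted : g.Pairwise (· < ·) := group_sorted production_rows date
  have hmono : ∀ a b : Nat, a ≤ b → b < g.length → g.getD a 0 ≤ g.getD b 0 := by
    intro a b hab hb
    rcases eq_or_lt_of_le hab with rfl | hlt
    · exact le_rfl
    · have := List.pairwise_iff_getElem.mp hsorted a b (by omega) hb hlt
      rw [List.getD_eq_getElem _ _ (by omega), List.getD_eq_getElem _ _ hb]
      exact le_of_lt this
  obtain ⟨hrle, hlo, hhi⟩ := bisect_inv g s hmono 0 g.length (by omega) le_rfl
    (fun j hj => absurd hj (by omega)) (fun j h1 h2 => absurd h1 (by omega))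
  set r := bisectLoop g s 0 g.length with hr0
  by_cases hr : r < g.length
  · rw [if_pos hr]
    have hx : g.getD r 0 ∈ g := by
      rw [List.getD_eq_getElem _ _ hr]; exact List.getElem_mem _
    rw [hg, mem_group] at hx
    obtain ⟨hx0, hxlt, hxdate⟩ := hx
    refine (innerA_spec_some production_rows date s _ (hhi r le_rfl hr) hxlt hxdate ?_).symm
    intro j hsj hji hmatch
    have hjg : j ∈ g := by
      rw [hg, mem_group]
      exact ⟨le_trans hs hsj, lt_trans hji hxlt, hmatch⟩
    obtain ⟨p, hp, hpe⟩ := List.getElem_of_mem hjg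
    by_cases hpr : p < r
    · have := hlo p hpr
      rw [List.getD_eq_getElem _ _ hp, hpe] at this
      omega
    · have hle2 : g.getD r 0 ≤ g.getD p 0 := hmono r p (by omega) hp
      rw [List.getD_eq_getElem _ _ hp, hpe] at hle2
      omega
  · rw [if_neg hr]
    refine (innerA_spec_none production_rows date s ?_).symm
    intro j hsj hjl hmatch
    have hjg : j ∈ g := by
      rw [hg, mem_group]
      exact ⟨le_trans hs hsj, hjl, hmatch⟩
    obtain ⟨p, hp, hpe⟩ := List.getElem_of_mem hjg
    have := hlo p (by omega)
    rw [List.getD_eq_getElem _ _ hp, hpe] at this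
    omega

-- per-row steps agree and keep p_start nonnegative
lemma step_eq (production_rows : List (List String)) (r : List String)
    (st : Int × List (List String)) (hs : 0 ≤ st.1) :
    stepA production_rows st r = stepB production_rows (buildIndex production_rows) st r ∧
      0 ≤ (stepB production_rows (buildIndex production_rows) st r).1 := by
  have hkey := index_getD production_rows (PySem.List.pyGetD r 0 "")
  have hstep := stepB_eq_innerA production_rows (PySem.List.pyGetD r 0 "") st.1 hs
  simp only [stepA, stepB, hkey]
  set g := group production_rows (PySem.List.pyGetD r 0 "") with hg
  by_cases hr : bisectLoop g st.1 0 g.length < g.length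
  · rw [if_pos hr] at hstep ⊢
    rw [← hstep]
    refine ⟨rfl, ?_⟩
    have hx : g.getD (bisectLoop g st.1 0 g.length) 0 ∈ g := by
      rw [List.getD_eq_getElem _ _ hr]; exact List.getElem_mem _
    rw [hg, mem_group] at hx
    exact hx.1
  · rw [if_neg hr] at hstep ⊢
    rw [← hstep]
    exact ⟨rfl, hs⟩

lemma main_eq (production_rows : List (List String)) (irradiance_rows : List (List String)) :
    join_irradiance_data production_rows irradiance_rows =
      join_irradiance_data_alt production_rows irradiance_rows := by
  unfold join_irradiance_data join_irradiance_data_alt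
  have H : ∀ (l : List (List String)) (st : Int × List (List String)), 0 ≤ st.1 →
      l.foldl (stepA production_rows) st =
        l.foldl (stepB production_rows (buildIndex production_rows)) st := by
    intro l
    induction l with
    | nil => intro st h; rfl
    | cons r l ih =>
      intro st h
      obtain ⟨he, hpos⟩ := step_eq production_rows r st h
      simp only [List.foldl_cons, he]
      exact ih _ hpos
  rw [H irradiance_rows ((0 : Int), ([] : List (List String))) (by norm_num)]

-- ===== VERDICT (by name: the statement is the Claim_ definition above) =====
theorem join_irradiance_data_spec : Claim_equal_join_irradiance_data := by
  intro production_rows irradiance_rows _ _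
  unfold Spec_join_irradiance_data
  exact main_eq production_rows irradiance_rows
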